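-- pv_equiv track=rewrite | github.com/sung0471/Algorithm | programmers/coding-test-high-score-kit/complete_search/1.py | solution
-- ===== SOURCE A (Python) =====
-- def solution(answers):
--     answer = []
--
--     omr = [     # 세 학생들의 찍기 패턴
--         [1,2,3,4,5],
--         [2,1,2,3,2,4,2,5],
--         [3,3,1,1,2,2,4,4,5,5]
--     ]
--     omr_idx = [0,0,0]   # 세 학생들의 찍기 패턴 위치
--     omr_length = [5,8,10]   # 세 학생들의 찍기 패턴 길이
--
--     omr_count = [0,0,0]     # 세 학생들의 정답 수
--
--     for number in answers:  # 모든 답안지 순회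
--         for idx in range(3):    # 세 학생들 모두 체크
--             if omr[idx][omr_idx[idx]] == number:    # 학생이 찍은 것 = 정답이면 +1
--                 omr_count[idx] += 1
--             omr_idx[idx] = (omr_idx[idx] + 1) % omr_length[idx] # 학생의 찍기 패턴 위치 이동
--
--     max_count = max(omr_count)  # 최대 정답 수 저장
--     for i in range(3):      # 최대 정답자들 저장
--         if max_count == omr_count[i]:
--             answer.append(i+1)
--
--     return answer
-- ===== SOURCE B (Python) =====
-- def solution(answers):
--     patterns = [[1, 2, 3, 4, 5],
--                 [2, 1, 2, 3, 2, 4, 2, 5],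
--                 [3, 3, 1, 1, 2, 2, 4, 4, 5, 5]]
--     # One pass: frequency table keyed by (index mod 40, answer value); 40 = lcm of
--     # the pattern lengths, so each pattern's score is 40 table lookups, no rescan.
--     cnt = {}
--     for i, a in enumerate(answers):
--         key = (i % 40, a)
--         cnt[key] = cnt.get(key, 0) + 1
--     scores = [sum(cnt.get((r, p[r % len(p)]), 0) for r in range(40))
--               for p in patterns]
--     best = max(scores)
--     return [i + 1 for i in range(3) if scores[i] == best]
-- ===== Notes on version B (the rewrite author's own statement) =====
-- stated objective: alternative
-- what changed: Instead of comparing every answer against the three patterns while scanning (A's per-answer pass with mutable modular index/count arrays), B scans the answers once only to build a frequency table keyed by (index mod 40, value) -- 40 = lcm of the pattern lengths -- and then computes each student's score by 40 table lookups without touching the answers again.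
import Mathlib
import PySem

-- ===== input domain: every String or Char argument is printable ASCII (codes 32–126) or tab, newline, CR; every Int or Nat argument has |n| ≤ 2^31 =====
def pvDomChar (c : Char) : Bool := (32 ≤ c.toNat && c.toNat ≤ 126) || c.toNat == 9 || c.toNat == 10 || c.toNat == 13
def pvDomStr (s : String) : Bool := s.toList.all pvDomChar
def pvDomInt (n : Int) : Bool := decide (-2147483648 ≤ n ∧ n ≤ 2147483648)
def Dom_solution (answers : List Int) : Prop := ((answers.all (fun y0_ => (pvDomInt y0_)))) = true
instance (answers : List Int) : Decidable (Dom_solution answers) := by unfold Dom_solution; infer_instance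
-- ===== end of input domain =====

-- B replaces A's per-answer comparison against the three patterns (mutable modular index/count
-- arrays) by one scan building a frequency table keyed by (index mod 40, value) — 40 = lcm of the
-- pattern lengths — after which each score is 40 table lookups; alternative data structure, same cost.

-- ===== PORT A =====
def solution (answers : List Int) : List Int :=
  let omr : List (List Int) := [[1,2,3,4,5],[2,1,2,3,2,4,2,5],[3,3,1,1,2,2,4,4,5,5]]
  let omr_length : List Int := [5,8,10]
  let st :=
    answers.foldl (fun (st : List Int × List Int) number =>
      (PySem.List.pyRange 0 3 1).foldl (fun (st : List Int × List Int) idx =>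
        let omr_idx := st.1
        let omr_count := st.2
        let omr_count :=
          if PySem.List.pyGetD (PySem.List.pyGetD omr idx []) (PySem.List.pyGetD omr_idx idx 0) 0 = number
          then PySem.List.pySetD omr_count idx (PySem.List.pyGetD omr_count idx 0 + 1)
          else omr_count
        let omr_idx := PySem.List.pySetD omr_idx idx
          (PySem.Int.mod (PySem.List.pyGetD omr_idx idx 0 + 1) (PySem.List.pyGetD omr_length idx 1))
        (omr_idx, omr_count)) st)
      ([0,0,0], [0,0,0])
  let omr_count := st.2
  let max_count := ((PySem.List.max? omr_count (fun x => x)).getD 0)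
  (PySem.List.pyRange 0 3 1).foldl (fun answer i =>
    if max_count = PySem.List.pyGetD omr_count i 0 then answer ++ [i + 1] else answer) []

-- ===== PORT B =====
-- cnt = {}; for i, a in enumerate(answers): cnt[(i % 40, a)] = cnt.get((i % 40, a), 0) + 1
def tableB (answers : List Int) : PySem.Dict (Int × Int) Int :=
  (PySem.List.enumerate answers 0).foldl
    (fun cnt ia =>
      cnt.insert (PySem.Int.mod ia.1 40, ia.2) (cnt.getD (PySem.Int.mod ia.1 40, ia.2) 0 + 1))
    PySem.Dict.empty

-- sum(cnt.get((r, p[r % len(p)]), 0) for r in range(40))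
def scoreB (p : List Int) (cnt : PySem.Dict (Int × Int) Int) : Int :=
  (PySem.List.pyRange 0 40 1).foldl
    (fun acc r => acc + cnt.getD (r, PySem.List.pyGetD p (PySem.Int.mod r (p.length : Int)) 0) 0) 0

def solution_alt (answers : List Int) : List Int :=
  let patterns : List (List Int) := [[1,2,3,4,5],[2,1,2,3,2,4,2,5],[3,3,1,1,2,2,4,4,5,5]]
  let cnt := tableB answers
  let scores := patterns.map (fun p => scoreB p cnt)
  let best := (PySem.List.max? scores (fun x => x)).getD 0
  ((PySem.List.pyRange 0 3 1).filter (fun i => PySem.List.pyGetD scores i 0 = best)).map (fun i => i + 1)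

-- ===== PRECONDITION & SPEC =====
def Spec_solution (answers : List Int) (out : List Int) : Prop := out = solution_alt answers
instance (answers : List Int) (out : List Int) : Decidable (Spec_solution answers out) := by unfold Spec_solution; infer_instance

-- ===== CLAIM (what is proved, stated in full; the proofs are below) =====
def Claim_equal_solution : Prop := ∀ (answers : List Int), Dom_solution answers → Spec_solution answers (solution answers)

-- ===== LEMMAS AND PROOFS =====

-- score of pattern p read cyclically (period L) starting at offset i over the remaining answers
def scoreOff (p : List Int) (L : Int) (i : Int) : List Int → Int
  | [] => 0
  | a :: t => (if PySem.List.pyGetD p i 0 = a then 1 else 0) + scoreOff p L ((i + 1) % L) t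

-- pattern position after consuming the remaining answers
def idxA (L : Int) (i : Int) : List Int → Int
  | [] => i
  | _ :: t => idxA L ((i + 1) % L) t

theorem emod_succ (s L : Int) : (s % L + 1) % L = (s + 1) % L := by
  rw [Int.add_emod, Int.emod_emod_of_dvd _ dvd_rfl, ← Int.add_emod]

theorem stepA (i0 i1 i2 c0 c1 c2 a : Int) :
    ((PySem.List.pyRange 0 3 1).foldl (fun (st : List Int × List Int) idx =>
        let omr_idx := st.1
        let omr_count := st.2
        let omr_count :=
          if PySem.List.pyGetD (PySem.List.pyGetD ([[1,2,3,4,5],[2,1,2,3,2,4,2,5],[3,3,1,1,2,2,4,4,5,5]] : List (List Int)) idx []) (PySem.List.pyGetD omr_idx idx 0) 0 = a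
          then PySem.List.pySetD omr_count idx (PySem.List.pyGetD omr_count idx 0 + 1)
          else omr_count
        let omr_idx := PySem.List.pySetD omr_idx idx
          (PySem.Int.mod (PySem.List.pyGetD omr_idx idx 0 + 1) (PySem.List.pyGetD ([5,8,10] : List Int) idx 1))
        (omr_idx, omr_count)) ([i0,i1,i2],[c0,c1,c2]))
    = ([(i0+1) % 5, (i1+1) % 8, (i2+1) % 10],
       [if PySem.List.pyGetD ([1,2,3,4,5] : List Int) i0 0 = a then c0 + 1 else c0,
        if PySem.List.pyGetD ([2,1,2,3,2,4,2,5] : List Int) i1 0 = a then c1 + 1 else c1,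
        if PySem.List.pyGetD ([3,3,1,1,2,2,4,4,5,5] : List Int) i2 0 = a then c2 + 1 else c2]) := by
  have h2 : (2:Int).toNat = 2 := rfl
  have h1 : (1:Int).toNat = 1 := rfl
  have h0 : (0:Int).toNat = 0 := rfl
  have hR : PySem.List.pyRange 0 3 1 = [0,1,2] := by decide
  rw [hR]
  simp only [List.foldl_cons, List.foldl_nil]
  norm_num [PySem.List.pySetD, PySem.List.pySet?, PySem.List.pyIdx?, PySem.List.pyGetD_ofNat', PySem.Int.mod_eq_emod_of_pos, h0, h1, h2, List.set]
  split_ifs <;> simp_all [List.set]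

theorem loopA (ans : List Int) : ∀ (i0 i1 i2 c0 c1 c2 : Int),
    (ans.foldl (fun (st : List Int × List Int) number =>
      (PySem.List.pyRange 0 3 1).foldl (fun (st : List Int × List Int) idx =>
        let omr_idx := st.1
        let omr_count := st.2
        let omr_count :=
          if PySem.List.pyGetD (PySem.List.pyGetD ([[1,2,3,4,5],[2,1,2,3,2,4,2,5],[3,3,1,1,2,2,4,4,5,5]] : List (List Int)) idx []) (PySem.List.pyGetD omr_idx idx 0) 0 = number
          then PySem.List.pySetD omr_count idx (PySem.List.pyGetD omr_count idx 0 + 1)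
          else omr_count
        let omr_idx := PySem.List.pySetD omr_idx idx
          (PySem.Int.mod (PySem.List.pyGetD omr_idx idx 0 + 1) (PySem.List.pyGetD ([5,8,10] : List Int) idx 1))
        (omr_idx, omr_count)) st)
      ([i0,i1,i2],[c0,c1,c2]))
    = ([idxA 5 i0 ans, idxA 8 i1 ans, idxA 10 i2 ans],
       [c0 + scoreOff [1,2,3,4,5] 5 i0 ans,
        c1 + scoreOff [2,1,2,3,2,4,2,5] 8 i1 ans,
        c2 + scoreOff [3,3,1,1,2,2,4,4,5,5] 10 i2 ans]) := by
  induction ans with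
  | nil => intro i0 i1 i2 c0 c1 c2; simp [idxA, scoreOff]
  | cons a t ih =>
    intro i0 i1 i2 c0 c1 c2
    rw [List.foldl_cons]
    show (t.foldl _ ((PySem.List.pyRange 0 3 1).foldl _ ([i0,i1,i2],[c0,c1,c2]))) = _
    rw [stepA, ih]
    simp only [idxA, scoreOff]
    refine congrArg _ ?_
    split_ifs <;> simp [add_assoc]

-- sum over a list where g differs from f only at r, by δ
theorem sum_map_update (f g : Int → Int) (r δ : Int)
    (h_r : g r = f r + δ) (h_ne : ∀ x, x ≠ r → g x = f x) :
    ∀ l : List Int, (l.map g).sum = (l.map f).sum + (l.count r : Int) * δ := by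
  intro l
  induction l with
  | nil => simp
  | cons x t ih =>
    by_cases hx : x = r
    · subst hx
      simp only [List.map_cons, List.sum_cons, ih, h_r, List.count_cons_self]
      push_cast; ring
    · rw [List.count_cons_of_ne hx]
      simp only [List.map_cons, List.sum_cons, ih, h_ne x hx]
      ring

theorem scoreB_insert (p : List Int) (hp : 0 < (p.length : Int)) (hdvd : (p.length : Int) ∣ 40)
    (cnt : PySem.Dict (Int × Int) Int) (s a : Int) :
    scoreB p (cnt.insert (s % 40, a) (cnt.getD (s % 40, a) 0 + 1))
    = scoreB p cnt + (if PySem.List.pyGetD p (s % (p.length : Int)) 0 = a then 1 else 0) := by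
  have hmodL : ∀ x : Int, PySem.Int.mod x (p.length : Int) = x % (p.length : Int) :=
    fun x => PySem.Int.mod_eq_emod_of_pos hp
  have hrL : (s % 40) % (p.length : Int) = s % (p.length : Int) := Int.emod_emod_of_dvd s hdvd
  set L : Int := (p.length : Int) with hL
  set δ : Int := (if PySem.List.pyGetD p (s % L) 0 = a then 1 else 0) with hδ
  set f : Int → Int := fun x => cnt.getD (x, PySem.List.pyGetD p (PySem.Int.mod x L) 0) 0 with hf
  set g : Int → Int := fun x =>
    (cnt.insert (s % 40, a) (cnt.getD (s % 40, a) 0 + 1)).getD (x, PySem.List.pyGetD p (PySem.Int.mod x L) 0) 0 with hg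
  have h_r : g (s % 40) = f (s % 40) + δ := by
    simp only [hg, hf, hδ, PySem.Dict.getD_insert, hmodL, hrL]
    by_cases hkey : PySem.List.pyGetD p (s % L) 0 = a
    · simp [hkey]
    · rw [if_neg (by simp [hkey]), if_neg hkey, add_zero]
  have h_ne : ∀ x, x ≠ s % 40 → g x = f x := by
    intro x hx
    simp only [hg, hf, PySem.Dict.getD_insert]
    rw [if_neg (by simp [hx])]
  have key := sum_map_update f g (s % 40) δ h_r h_ne (PySem.List.pyRange 0 40 1)
  have hcount : (PySem.List.pyRange 0 40 1).count (s % 40) = 1 :=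
    List.count_eq_one_of_mem (PySem.List.nodup_pyRange_one 0 40)
      (by rw [PySem.List.mem_pyRange_one]; omega)
  unfold scoreB
  rw [PySem.List.foldl_add, PySem.List.foldl_add, zero_add, zero_add]
  rw [← hL, show (fun r => (cnt.insert (s % 40, a) (cnt.getD (s % 40, a) 0 + 1)).getD
        (r, PySem.List.pyGetD p (PySem.Int.mod r L) 0) 0) = g from rfl,
     show (fun r => cnt.getD (r, PySem.List.pyGetD p (PySem.Int.mod r L) 0) 0) = f from rfl]
  rw [key, hcount]
  push_cast; ring

theorem scoreB_fold (p : List Int) (hp : 0 < (p.length : Int)) (hdvd : (p.length : Int) ∣ 40) :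
    ∀ (ans : List Int) (s : Int) (cnt : PySem.Dict (Int × Int) Int), 0 ≤ s →
    scoreB p ((PySem.List.enumerate ans s).foldl
      (fun cnt ia =>
        cnt.insert (PySem.Int.mod ia.1 40, ia.2) (cnt.getD (PySem.Int.mod ia.1 40, ia.2) 0 + 1)) cnt)
    = scoreB p cnt + scoreOff p (p.length : Int) (s % (p.length : Int)) ans := by
  intro ans
  induction ans with
  | nil => intro s cnt _; simp [PySem.List.enumerate_nil, scoreOff]
  | cons a t ih =>
    intro s cnt hs
    rw [PySem.List.enumerate_cons, List.foldl_cons]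
    have hm40 : PySem.Int.mod s 40 = s % 40 := PySem.Int.mod_eq_emod_of_pos (by norm_num)
    simp only [hm40]
    rw [ih (s + 1) _ (by omega), scoreB_insert p hp hdvd cnt s a]
    simp only [scoreOff, emod_succ]
    ring

theorem scoreB_empty (p : List Int) : scoreB p PySem.Dict.empty = 0 := by
  unfold scoreB
  rw [PySem.List.foldl_add, zero_add]
  simp [PySem.Dict.getD_empty]

theorem scoreB_tableB (p : List Int) (hp : 0 < (p.length : Int)) (hdvd : (p.length : Int) ∣ 40)
    (ans : List Int) :
    scoreB p (tableB ans) = scoreOff p (p.length : Int) 0 ans := by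
  unfold tableB
  rw [scoreB_fold p hp hdvd ans 0 PySem.Dict.empty le_rfl, scoreB_empty, Int.zero_emod, zero_add]

theorem final3 (s0 s1 s2 M : Int) :
    List.foldl (fun answer i => if M = PySem.List.pyGetD [s0,s1,s2] i 0 then answer ++ [i + 1] else answer) [] ([0,1,2] : List Int)
    = List.map (fun i => i + 1) (List.filter (fun i => PySem.List.pyGetD [s0,s1,s2] i 0 = M) ([0,1,2] : List Int)) := by
  have h2 : (2:Int).toNat = 2 := rfl
  have h1 : (1:Int).toNat = 1 := rfl
  have h0 : (0:Int).toNat = 0 := rfl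
  have E0 : (s0 = M) = (M = s0) := propext ⟨Eq.symm, Eq.symm⟩
  have E1 : (s1 = M) = (M = s1) := propext ⟨Eq.symm, Eq.symm⟩
  have E2 : (s2 = M) = (M = s2) := propext ⟨Eq.symm, Eq.symm⟩
  simp only [List.foldl_cons, List.foldl_nil, List.filter_cons, List.filter_nil, decide_eq_true_eq]
  norm_num [PySem.List.pyGetD_ofNat', h0, h1, h2, E0, E1, E2]
  split_ifs <;> simp

-- ===== VERDICT (by name: the statement is the Claim_ definition above) =====
set_option maxHeartbeats 1000000 in
theorem solution_spec : Claim_equal_solution := by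
  intro answers _
  unfold Spec_solution
  simp only [solution, solution_alt, List.map]
  rw [loopA]
  simp only [scoreB_tableB [1,2,3,4,5] (by norm_num) (by norm_num) answers,
      scoreB_tableB [2,1,2,3,2,4,2,5] (by norm_num) (by norm_num) answers,
      scoreB_tableB [3,3,1,1,2,2,4,4,5,5] (by norm_num) (by norm_num) answers]
  norm_num
  have hR : PySem.List.pyRange 0 3 1 = [0,1,2] := by decide
  rw [hR]
  set s0 := scoreOff [1,2,3,4,5] 5 0 answers
  set s1 := scoreOff [2,1,2,3,2,4,2,5] 8 0 answers
  set s2 := scoreOff [3,3,1,1,2,2,4,4,5,5] 10 0 answers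
  set M := ((PySem.List.max? [s0,s1,s2] (fun x => x)).getD 0)
  exact final3 s0 s1 s2 M
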